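-- pv_equiv track=rewrite | github.com/phucnb/100-days-python-challenge | Day-9/main.py | find_highest_bidders
-- ===== SOURCE A (Python) =====
-- def find_highest_bidders(bidders):
--     '''
--     The function take 1 parameter as a dict of all bidders
--     and return a dict bidders have the same highest bid
--     '''
--     highest_bid = 0
--     highest_bidders = {}
--     for bidder in bidders:
--         highest_bid = bidders[bidder] if bidders[bidder] > highest_bid else highest_bid
--
--     for bidder in bidders:
--         if bidders[bidder] == highest_bid:
--             highest_bidders[bidder] = bidders[bidder]
--
--     return highest_bidders
-- ===== SOURCE B (Python) =====
-- def find_highest_bidders(bidders):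
--     '''
--     The function take 1 parameter as a dict of all bidders
--     and return a dict bidders have the same highest bid
--     '''
--     highest_bid = 0
--     highest_bidders = {}
--     for bidder, bid in bidders.items():
--         if bid > highest_bid:
--             highest_bid = bid
--             highest_bidders = {bidder: bid}
--         elif bid == highest_bid:
--             highest_bidders[bidder] = bid
--     return highest_bidders
-- ===== Notes on version B (the rewrite author's own statement) =====
-- stated objective: alternative
-- what changed: Fuses A's two passes (max with floor 0, then collect) into one pass that keeps the running max and the dict of current leaders, resetting the dict on a strictly greater bid; same linear cost.
import Mathlib
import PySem

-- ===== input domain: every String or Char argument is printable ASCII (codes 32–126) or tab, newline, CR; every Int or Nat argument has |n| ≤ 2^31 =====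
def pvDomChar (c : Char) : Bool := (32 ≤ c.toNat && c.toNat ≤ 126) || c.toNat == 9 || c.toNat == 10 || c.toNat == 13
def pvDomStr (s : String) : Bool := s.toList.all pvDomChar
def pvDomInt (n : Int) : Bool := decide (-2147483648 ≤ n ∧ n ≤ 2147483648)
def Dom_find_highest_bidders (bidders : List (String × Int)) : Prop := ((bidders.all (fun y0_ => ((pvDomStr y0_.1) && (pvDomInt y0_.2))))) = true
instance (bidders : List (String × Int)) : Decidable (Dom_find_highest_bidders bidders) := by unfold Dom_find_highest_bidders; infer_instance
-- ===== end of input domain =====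

-- B fuses A's two passes into one pass (running max + dict of current leaders, reset on a strictly greater bid);
-- the return values are proved equal (neither Python mutates its argument).

-- ===== PORT A =====
-- Python A iterates the dict's keys and looks each key up (`bidders[bidder]`); the lookup is
-- first-match on the assoc list (`getD _ 0` is exact: the key is always present, so no KeyError).
def find_highest_bidders (bidders : List (String × Int)) : List (String × Int) :=
  let b : PySem.Dict String Int := PySem.Dict.mk bidders
  let highest_bid : Int :=
    bidders.foldl (fun hb p => if b.getD p.1 0 > hb then b.getD p.1 0 else hb) 0
  (bidders.foldl
    (fun (hd : PySem.Dict String Int) p =>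
      if b.getD p.1 0 = highest_bid then hd.insert p.1 (b.getD p.1 0) else hd)
    PySem.Dict.empty).items

-- ===== PORT B =====
def find_highest_bidders_alt (bidders : List (String × Int)) : List (String × Int) :=
  (bidders.foldl
    (fun (st : Int × PySem.Dict String Int) p =>
      if p.2 > st.1 then (p.2, PySem.Dict.empty.insert p.1 p.2)
      else if p.2 = st.1 then (st.1, st.2.insert p.1 p.2)
      else st)
    (0, PySem.Dict.empty)).2.items

-- ===== PRECONDITION & SPEC =====
-- Pre_ excludes association lists with duplicate keys: those do not represent any Python dict
-- (A's argument is a dict, whose keys are unique), so no input of the Python programs is excluded.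
def Pre_find_highest_bidders (bidders : List (String × Int)) : Prop :=
  (bidders.map Prod.fst).Nodup
instance (bidders : List (String × Int)) : Decidable (Pre_find_highest_bidders bidders) := by
  unfold Pre_find_highest_bidders; infer_instance

def pvWitness_find_highest_bidders : (List (String × Int)) := [("a", 3), ("b", 3), ("c", 1)]

def Spec_find_highest_bidders (bidders : List (String × Int)) (out : List (String × Int)) : Prop := out = find_highest_bidders_alt bidders
instance (bidders : List (String × Int)) (out : List (String × Int)) : Decidable (Spec_find_highest_bidders bidders out) := by unfold Spec_find_highest_bidders; infer_instance

-- ===== CLAIM (what is proved, stated in full; the proofs are below) =====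
def Claim_equal_find_highest_bidders : Prop := ∀ (bidders : List (String × Int)), Dom_find_highest_bidders bidders → Pre_find_highest_bidders bidders → Spec_find_highest_bidders bidders (find_highest_bidders bidders)

-- ===== LEMMAS AND PROOFS =====

-- the three loop bodies, named for the proofs
def fhbMax (hb : Int) (l : List (String × Int)) : Int :=
  l.foldl (fun a p => if p.2 > a then p.2 else a) hb

def fhbCollect (m : Int) (d : PySem.Dict String Int) (l : List (String × Int)) :
    PySem.Dict String Int :=
  l.foldl (fun hd p => if p.2 = m then hd.insert p.1 p.2 else hd) d

def fhbStep (st : Int × PySem.Dict String Int) (p : String × Int) :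
    Int × PySem.Dict String Int :=
  if p.2 > st.1 then (p.2, PySem.Dict.empty.insert p.1 p.2)
  else if p.2 = st.1 then (st.1, st.2.insert p.1 p.2)
  else st

lemma le_fhbMax (l : List (String × Int)) : ∀ hb : Int, hb ≤ fhbMax hb l := by
  induction l with
  | nil => intro hb; simp [fhbMax]
  | cons p t ih =>
    intro hb
    have h0 : hb ≤ (if p.2 > hb then p.2 else hb) := by
      split_ifs with hc
      · exact le_of_lt hc
      · exact le_refl hb
    simp only [fhbMax, List.foldl_cons]
    exact le_trans h0 (ih _)

-- characterisation of B's single pass in terms of A's two loop bodies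
lemma fhb_main (l : List (String × Int)) : ∀ (hb : Int) (d : PySem.Dict String Int),
    l.foldl fhbStep (hb, d) =
      (fhbMax hb l,
        if hb < fhbMax hb l then fhbCollect (fhbMax hb l) PySem.Dict.empty l
        else fhbCollect hb d l) := by
  induction l with
  | nil => intro hb d; simp [fhbMax, fhbCollect]
  | cons p t ih =>
    intro hb d
    by_cases h1 : p.2 > hb
    · have hstep : fhbStep (hb, d) p = (p.2, PySem.Dict.empty.insert p.1 p.2) := by
        simp [fhbStep, h1]
      have hM : fhbMax hb (p :: t) = fhbMax p.2 t := by
        simp [fhbMax, h1]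
      have hle : p.2 ≤ fhbMax p.2 t := le_fhbMax t p.2
      have hlt : hb < fhbMax p.2 t := lt_of_lt_of_le h1 hle
      rw [List.foldl_cons, hstep, ih, hM, if_pos hlt]
      by_cases h2 : p.2 < fhbMax p.2 t
      · rw [if_pos h2]
        have hne : p.2 ≠ fhbMax p.2 t := ne_of_lt h2
        simp [fhbCollect, hne]
      · have heq : p.2 = fhbMax p.2 t := le_antisymm hle (not_lt.mp h2)
        rw [if_neg h2, ← heq]
        simp [fhbCollect]
    · have hM : fhbMax hb (p :: t) = fhbMax hb t := by
        simp [fhbMax, h1]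
      by_cases h2 : p.2 = hb
      · have hstep : fhbStep (hb, d) p = (hb, d.insert p.1 p.2) := by
          simp [fhbStep, h2]
        rw [List.foldl_cons, hstep, ih, hM]
        by_cases h3 : hb < fhbMax hb t
        · have hne : p.2 ≠ fhbMax hb t := by rw [h2]; exact ne_of_lt h3
          simp [fhbCollect, hne, h3]
        · simp [fhbCollect, h2, h3]
      · have hstep : fhbStep (hb, d) p = (hb, d) := by
          simp [fhbStep, h1, h2]
        rw [List.foldl_cons, hstep, ih, hM]
        have hne : p.2 ≠ fhbMax hb t := by
          intro he
          exact h1 (lt_of_le_of_ne (he ▸ le_fhbMax t hb) (Ne.symm (he ▸ h2)))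
        simp [fhbCollect, hne, h2]

-- with nodup keys, looking a pair's key up in the whole list gives the pair's value
lemma lookup_self (l : List (String × Int)) (hnd : (l.map Prod.fst).Nodup)
    (p : String × Int) (hp : p ∈ l) : (PySem.Dict.mk l).getD p.1 0 = p.2 := by
  have hnd' : (PySem.Dict.mk l).keys.Nodup := by
    rw [PySem.Dict.keys_mk]; exact hnd
  exact PySem.Dict.getD_of_mem_items (PySem.Dict.mk l) (k := p.1) (v := p.2)
    (by simpa using hp) hnd' 0

-- ===== VERDICT (by name: the statement is the Claim_ definition above) =====
theorem find_highest_bidders_spec : Claim_equal_find_highest_bidders := by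
  intro bidders _ hpre
  unfold Spec_find_highest_bidders find_highest_bidders find_highest_bidders_alt
  have hlk := lookup_self bidders hpre
  -- replace the lookups in A's two folds by the pair's own value
  have hmax :
      bidders.foldl (fun hb p => if (PySem.Dict.mk bidders).getD p.1 0 > hb
          then (PySem.Dict.mk bidders).getD p.1 0 else hb) 0 = fhbMax 0 bidders := by
    unfold fhbMax
    exact PySem.List.foldl_congr_mem _ _ _ _ (fun acc x hx => by rw [hlk x hx])
  have hcol : ∀ m : Int,
      bidders.foldl (fun (hd : PySem.Dict String Int) p =>
          if (PySem.Dict.mk bidders).getD p.1 0 = m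
          then hd.insert p.1 ((PySem.Dict.mk bidders).getD p.1 0) else hd)
        PySem.Dict.empty = fhbCollect m PySem.Dict.empty bidders := by
    intro m
    unfold fhbCollect
    exact PySem.List.foldl_congr_mem _ _ _ _ (fun acc x hx => by rw [hlk x hx])
  have hB : bidders.foldl (fun (st : Int × PySem.Dict String Int) p =>
      if p.2 > st.1 then (p.2, PySem.Dict.empty.insert p.1 p.2)
      else if p.2 = st.1 then (st.1, st.2.insert p.1 p.2)
      else st) (0, PySem.Dict.empty) = bidders.foldl fhbStep (0, PySem.Dict.empty) := rfl
  rw [hB, fhb_main]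
  simp only [hmax, hcol]
  by_cases h : (0 : Int) < fhbMax 0 bidders
  · rw [if_pos h]
  · rw [if_neg h]
    have : fhbMax 0 bidders = 0 := le_antisymm (not_lt.mp h) (le_fhbMax bidders 0)
    rw [this]
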